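-- pv_equiv track=rewrite | github.com/CamoLover/AssaultronProject | virtual_body.py | analyze_user_message_for_world_cues
-- ===== SOURCE A (Python) =====
-- from typing import Optional, List, Dict, Any
--
-- def analyze_user_message_for_world_cues(message: str) -> Dict[str, Any]:
--     """
--     Analyze user message for environmental cues that should update world state.
--
--     This is a simple heuristic parser. In the future, this could be replaced
--     with more sophisticated NLP or even CV-based perception.
--
--     Args:
--         message: User's text input
--
--     Returns:
--         Dictionary of world state updates
--     """
--     message_lower = message.lower()
--     updates = {}
--
--     # Detect lighting conditions
--     if any(word in message_lower for word in ["dark", "dim", "can't see"]):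
--         updates["environment"] = "dark"
--     elif any(word in message_lower for word in ["bright", "too much light", "blinding"]):
--         updates["environment"] = "bright"
--
--     # Detect threat cues
--     if any(word in message_lower for word in ["intruder", "threat", "danger", "help", "attack"]):
--         updates["threat_level"] = "high"
--     elif any(word in message_lower for word in ["suspicious", "watch out", "careful"]):
--         updates["threat_level"] = "medium"
--     elif any(word in message_lower for word in ["safe", "all clear", "relax"]):
--         updates["threat_level"] = "none"
--
--     # Future: time of day, entity detection, etc.
--
--     return updates
-- ===== SOURCE B (Python) =====
-- # Inverted index: one flat scan over all keywords, keeping the best-ranked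
-- # (lowest rank = earliest option in A's if/elif chain) match per category.
-- KEYWORD_INDEX = [
--     ("dark", "environment", "dark", 0),
--     ("dim", "environment", "dark", 0),
--     ("can't see", "environment", "dark", 0),
--     ("bright", "environment", "bright", 1),
--     ("too much light", "environment", "bright", 1),
--     ("blinding", "environment", "bright", 1),
--     ("intruder", "threat_level", "high", 0),
--     ("threat", "threat_level", "high", 0),
--     ("danger", "threat_level", "high", 0),
--     ("help", "threat_level", "high", 0),
--     ("attack", "threat_level", "high", 0),
--     ("suspicious", "threat_level", "medium", 1),
--     ("watch out", "threat_level", "medium", 1),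
--     ("careful", "threat_level", "medium", 1),
--     ("safe", "threat_level", "none", 2),
--     ("all clear", "threat_level", "none", 2),
--     ("relax", "threat_level", "none", 2),
-- ]
--
-- def analyze_user_message_for_world_cues(message: str):
--     message_lower = message.lower()
--     best = {}
--     for kw, key, value, rank in KEYWORD_INDEX:
--         if kw in message_lower:
--             cur = best.get(key)
--             if cur is None or rank < cur[0]:
--                 best[key] = (rank, value)
--     return {key: best[key][1] for key in ("environment", "threat_level") if key in best}
-- ===== Notes on version B (the rewrite author's own statement) =====
-- stated objective: alternative
-- what changed: Replaces A's per-category if/elif first-match chains with an inverted flat keyword index scanned once, keeping the lowest-ranked (earliest-option) match per category in a dict and emitting categories in fixed order at the end.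
import Mathlib
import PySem

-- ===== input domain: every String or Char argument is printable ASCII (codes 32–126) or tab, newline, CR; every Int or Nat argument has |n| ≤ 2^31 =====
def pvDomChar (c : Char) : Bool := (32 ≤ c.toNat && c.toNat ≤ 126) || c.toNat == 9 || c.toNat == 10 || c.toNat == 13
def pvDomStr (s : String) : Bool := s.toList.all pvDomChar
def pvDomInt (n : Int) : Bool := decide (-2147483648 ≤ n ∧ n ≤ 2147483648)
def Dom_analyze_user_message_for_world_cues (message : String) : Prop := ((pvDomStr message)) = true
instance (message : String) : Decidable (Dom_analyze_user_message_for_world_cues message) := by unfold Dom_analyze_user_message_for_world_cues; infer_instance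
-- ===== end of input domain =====

-- ===== PORT A =====
-- B replaces A's per-category if/elif chains by one flat scan of an inverted keyword index keeping the best-ranked match per category; same outputs ('alternative').
def analyze_user_message_for_world_cues (message : String) : List (String × String) :=
  let message_lower := PySem.Str.lower message
  let updates : PySem.Dict String String := PySem.Dict.empty
  let updates :=
    if ["dark", "dim", "can't see"].any (fun w => PySem.Str.isIn w message_lower) then
      updates.insert "environment" "dark"
    else if ["bright", "too much light", "blinding"].any (fun w => PySem.Str.isIn w message_lower) then
      updates.insert "environment" "bright"
    else updates
  let updates :=
    if ["intruder", "threat", "danger", "help", "attack"].any (fun w => PySem.Str.isIn w message_lower) then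
      updates.insert "threat_level" "high"
    else if ["suspicious", "watch out", "careful"].any (fun w => PySem.Str.isIn w message_lower) then
      updates.insert "threat_level" "medium"
    else if ["safe", "all clear", "relax"].any (fun w => PySem.Str.isIn w message_lower) then
      updates.insert "threat_level" "none"
    else updates
  updates.items

-- ===== PORT B =====
-- the flat inverted index: (keyword, category key, value, rank of the option inside its category)
def pvKeywordIndex : List (String × String × String × Nat) :=
  [("dark", "environment", "dark", 0),
   ("dim", "environment", "dark", 0),
   ("can't see", "environment", "dark", 0),
   ("bright", "environment", "bright", 1),
   ("too much light", "environment", "bright", 1),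
   ("blinding", "environment", "bright", 1),
   ("intruder", "threat_level", "high", 0),
   ("threat", "threat_level", "high", 0),
   ("danger", "threat_level", "high", 0),
   ("help", "threat_level", "high", 0),
   ("attack", "threat_level", "high", 0),
   ("suspicious", "threat_level", "medium", 1),
   ("watch out", "threat_level", "medium", 1),
   ("careful", "threat_level", "medium", 1),
   ("safe", "threat_level", "none", 2),
   ("all clear", "threat_level", "none", 2),
   ("relax", "threat_level", "none", 2)]

-- the body of B's for-loop
def pvAbsorb (message_lower : String) (best : PySem.Dict String (Nat × String))
    (e : String × String × String × Nat) : PySem.Dict String (Nat × String) :=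
  let (kw, key, value, rank) := e
  if PySem.Str.isIn kw message_lower then
    match best.get? key with
    | some cur => if rank < cur.1 then best.insert key (rank, value) else best
    | none => best.insert key (rank, value)
  else best

def analyze_user_message_for_world_cues_alt (message : String) : List (String × String) :=
  let message_lower := PySem.Str.lower message
  let best := pvKeywordIndex.foldl (pvAbsorb message_lower) PySem.Dict.empty
  (["environment", "threat_level"] : List String).filterMap
    (fun key => (best.get? key).map (fun rv => (key, rv.2)))

-- ===== PRECONDITION & SPEC =====
def Spec_analyze_user_message_for_world_cues (message : String) (out : List (String × String)) : Prop := out = analyze_user_message_for_world_cues_alt message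
instance (message : String) (out : List (String × String)) : Decidable (Spec_analyze_user_message_for_world_cues message out) := by unfold Spec_analyze_user_message_for_world_cues; infer_instance

-- ===== CLAIM =====
def Claim_equal_analyze_user_message_for_world_cues : Prop := ∀ (message : String), Dom_analyze_user_message_for_world_cues message → Spec_analyze_user_message_for_world_cues message (analyze_user_message_for_world_cues message)

-- ===== LEMMAS AND PROOFS =====

-- folding a keyword group over a dict that already holds an entry of rank ≤ rank for its key changes nothing
theorem pv_group_stable (ml key value : String) (rank : Nat) (kws : List String)
    (d : PySem.Dict String (Nat × String)) (cur : Nat × String)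
    (h : d.get? key = some cur) (hr : ¬ rank < cur.1) :
    List.foldl (pvAbsorb ml) d (kws.map (fun k => (k, key, value, rank))) = d := by
  induction kws with
  | nil => rfl
  | cons k ks ih =>
    simp only [List.map, List.foldl, pvAbsorb, h, if_neg hr]
    cases PySem.Str.isIn k ml <;> simpa using ih

-- folding a keyword group over a dict with no entry for its key inserts iff some keyword matches
theorem pv_group_none (ml key value : String) (rank : Nat) (kws : List String)
    (d : PySem.Dict String (Nat × String)) (h : d.get? key = none) :
    List.foldl (pvAbsorb ml) d (kws.map (fun k => (k, key, value, rank))) =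
      if kws.any (fun w => PySem.Str.isIn w ml) then d.insert key (rank, value) else d := by
  induction kws with
  | nil => simp
  | cons k ks ih =>
    cases hk : PySem.Str.isIn k ml with
    | true =>
      simp only [List.map, List.foldl, pvAbsorb, h, hk, if_true, List.any_cons, Bool.true_or]
      exact pv_group_stable ml key value rank ks _ (rank, value)
        (PySem.Dict.get?_insert_self _ _ _) (lt_irrefl rank)
    | false =>
      simp only [List.map, List.foldl, pvAbsorb, h, hk, List.any_cons, Bool.false_or]
      exact ih

-- ===== VERDICT =====
theorem analyze_user_message_for_world_cues_spec : Claim_equal_analyze_user_message_for_world_cues := by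
  intro message _
  unfold Spec_analyze_user_message_for_world_cues
  simp only [analyze_user_message_for_world_cues, analyze_user_message_for_world_cues_alt]
  generalize PySem.Str.lower message = ml
  have hsplit : pvKeywordIndex =
      (["dark", "dim", "can't see"].map (fun k => (k, "environment", "dark", (0 : Nat)))) ++
      (["bright", "too much light", "blinding"].map (fun k => (k, "environment", "bright", (1 : Nat)))) ++
      (["intruder", "threat", "danger", "help", "attack"].map (fun k => (k, "threat_level", "high", (0 : Nat)))) ++
      (["suspicious", "watch out", "careful"].map (fun k => (k, "threat_level", "medium", (1 : Nat)))) ++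
      (["safe", "all clear", "relax"].map (fun k => (k, "threat_level", "none", (2 : Nat)))) := by rfl
  rw [hsplit, List.foldl_append, List.foldl_append, List.foldl_append, List.foldl_append]
  rw [pv_group_none ml "environment" "dark" 0 _ PySem.Dict.empty rfl]
  cases h1 : ["dark", "dim", "can't see"].any (fun w => PySem.Str.isIn w ml) with
  | true =>
    simp only [reduceIte]
    rw [pv_group_stable ml "environment" "bright" 1 _ _ (0, "dark") rfl (by omega)]
    rw [pv_group_none ml "threat_level" "high" 0 _ _ rfl]
    cases h3 : ["intruder", "threat", "danger", "help", "attack"].any (fun w => PySem.Str.isIn w ml) with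
    | true =>
      simp only [reduceIte]
      rw [pv_group_stable ml "threat_level" "medium" 1 _ _ (0, "high") rfl (by omega)]
      rw [pv_group_stable ml "threat_level" "none" 2 _ _ (0, "high") rfl (by omega)]
      rfl
    | false =>
      simp only [Bool.false_eq_true, reduceIte]
      rw [pv_group_none ml "threat_level" "medium" 1 _ _ rfl]
      cases h4 : ["suspicious", "watch out", "careful"].any (fun w => PySem.Str.isIn w ml) with
      | true =>
        simp only [reduceIte]
        rw [pv_group_stable ml "threat_level" "none" 2 _ _ (1, "medium") rfl (by omega)]
        rfl
      | false =>
        simp only [Bool.false_eq_true, reduceIte]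
        rw [pv_group_none ml "threat_level" "none" 2 _ _ rfl]
        cases h5 : ["safe", "all clear", "relax"].any (fun w => PySem.Str.isIn w ml) <;> rfl
  | false =>
    simp only [Bool.false_eq_true, reduceIte]
    rw [pv_group_none ml "environment" "bright" 1 _ PySem.Dict.empty rfl]
    cases h2 : ["bright", "too much light", "blinding"].any (fun w => PySem.Str.isIn w ml) with
    | true =>
      simp only [reduceIte]
      rw [pv_group_none ml "threat_level" "high" 0 _ _ rfl]
      cases h3 : ["intruder", "threat", "danger", "help", "attack"].any (fun w => PySem.Str.isIn w ml) with
      | true =>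
        simp only [reduceIte]
        rw [pv_group_stable ml "threat_level" "medium" 1 _ _ (0, "high") rfl (by omega)]
        rw [pv_group_stable ml "threat_level" "none" 2 _ _ (0, "high") rfl (by omega)]
        rfl
      | false =>
        simp only [Bool.false_eq_true, reduceIte]
        rw [pv_group_none ml "threat_level" "medium" 1 _ _ rfl]
        cases h4 : ["suspicious", "watch out", "careful"].any (fun w => PySem.Str.isIn w ml) with
        | true =>
          simp only [reduceIte]
          rw [pv_group_stable ml "threat_level" "none" 2 _ _ (1, "medium") rfl (by omega)]
          rfl
        | false =>
          simp only [Bool.false_eq_true, reduceIte]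
          rw [pv_group_none ml "threat_level" "none" 2 _ _ rfl]
          cases h5 : ["safe", "all clear", "relax"].any (fun w => PySem.Str.isIn w ml) <;> rfl
    | false =>
      simp only [Bool.false_eq_true, reduceIte]
      rw [pv_group_none ml "threat_level" "high" 0 _ _ rfl]
      cases h3 : ["intruder", "threat", "danger", "help", "attack"].any (fun w => PySem.Str.isIn w ml) with
      | true =>
        simp only [reduceIte]
        rw [pv_group_stable ml "threat_level" "medium" 1 _ _ (0, "high") rfl (by omega)]
        rw [pv_group_stable ml "threat_level" "none" 2 _ _ (0, "high") rfl (by omega)]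
        rfl
      | false =>
        simp only [Bool.false_eq_true, reduceIte]
        rw [pv_group_none ml "threat_level" "medium" 1 _ _ rfl]
        cases h4 : ["suspicious", "watch out", "careful"].any (fun w => PySem.Str.isIn w ml) with
        | true =>
          simp only [reduceIte]
          rw [pv_group_stable ml "threat_level" "none" 2 _ _ (1, "medium") rfl (by omega)]
          rfl
        | false =>
          simp only [Bool.false_eq_true, reduceIte]
          rw [pv_group_none ml "threat_level" "none" 2 _ _ rfl]
          cases h5 : ["safe", "all clear", "relax"].any (fun w => PySem.Str.isIn w ml) <;> rfl
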